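-- pv_equiv track=rewrite | github.com/Manuel-7tin/PycharmProjects | WhatsappThing/temp.py | caution_split
-- ===== SOURCE A (Python) =====
-- def caution_split(text: str, delimiter: str) -> list:
-- 	text_details = text.split(delimiter)
-- 	if len(text_details) > 2:
-- 		second_part = ""
-- 		for j in range(len(text_details)):
-- 			if j == 0:
-- 				continue
-- 			second_part += text_details[j] + delimiter
-- 		text_details = [text_details[0], second_part]
-- 	return text_details
-- ===== SOURCE B (Python) =====
-- def caution_split(text: str, delimiter: str) -> list:
--     parts = text.split(delimiter, 1)
--     if len(parts) == 2 and delimiter in parts[1]: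
--         return [parts[0], parts[1] + delimiter]
--     return parts
-- ===== Notes on version B (the rewrite author's own statement) =====
-- stated objective: simpler
-- what changed: B splits only once with str.split(delimiter, 1) and re-appends the trailing delimiter when more delimiters remain, replacing A's full split followed by an index loop that re-joins all the tail pieces.
import Mathlib
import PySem

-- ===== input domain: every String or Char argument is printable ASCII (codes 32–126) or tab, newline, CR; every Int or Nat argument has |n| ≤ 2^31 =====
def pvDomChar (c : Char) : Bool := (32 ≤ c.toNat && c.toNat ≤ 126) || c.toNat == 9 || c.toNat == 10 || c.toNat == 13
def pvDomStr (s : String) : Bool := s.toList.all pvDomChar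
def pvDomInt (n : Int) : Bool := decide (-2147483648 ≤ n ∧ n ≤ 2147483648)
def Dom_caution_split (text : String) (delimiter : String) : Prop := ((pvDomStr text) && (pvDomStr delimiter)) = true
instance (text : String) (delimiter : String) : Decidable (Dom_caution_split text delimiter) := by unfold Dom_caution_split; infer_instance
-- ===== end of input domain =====

-- B replaces A's full split + re-join loop by a single maxsplit=1 split plus a
-- membership test that re-appends the trailing delimiter (objective: simpler).


-- ===== PORT A =====
def caution_split (text : String) (delimiter : String) : List String :=
  match PySem.Str.split? text delimiter with
  | none => []  -- delimiter = "": Python raises ValueError; excluded by Pre_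
  | some text_details =>
    if 2 < text_details.length then
      let second_part :=
        (PySem.List.pyRange 0 (text_details.length : Int)).foldl
          (fun acc j => if j == 0 then acc
            else acc ++ PySem.List.pyGetD text_details j "" ++ delimiter) ""
      [PySem.List.pyGetD text_details 0 "", second_part]
    else text_details

-- ===== PORT B =====
def caution_split_alt (text : String) (delimiter : String) : List String :=
  match PySem.Str.splitMax? text delimiter 1 with
  | none => []  -- delimiter = "": Python raises ValueError; excluded by Pre_
  | some parts =>
    if parts.length == 2 && PySem.Str.isIn delimiter (PySem.List.pyGetD parts 1 "") then
      [PySem.List.pyGetD parts 0 "", PySem.List.pyGetD parts 1 "" ++ delimiter]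
    else parts

-- ===== PRECONDITION & SPEC =====
-- Pre_ excludes exactly delimiter = "", on which Python's str.split raises ValueError.
def Pre_caution_split (text : String) (delimiter : String) : Prop := delimiter ≠ ""
instance (text : String) (delimiter : String) : Decidable (Pre_caution_split text delimiter) := by unfold Pre_caution_split; infer_instance
def pvWitness_caution_split : String × String := ("a,b,c", ",")
def Spec_caution_split (text : String) (delimiter : String) (out : List String) : Prop := out = caution_split_alt text delimiter
instance (text : String) (delimiter : String) (out : List String) : Decidable (Spec_caution_split text delimiter out) := by unfold Spec_caution_split; infer_instance

-- ===== CLAIM (what is proved, stated in full; the proofs are below) =====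
def Claim_equal_caution_split : Prop := ∀ (text : String) (delimiter : String), Dom_caution_split text delimiter → Pre_caution_split text delimiter → Spec_caution_split text delimiter (caution_split text delimiter)

-- ===== LEMMAS AND PROOFS =====

-- unfolding equations for PySem.Chars.splitOn.go / splitOnMax.go
theorem go_zero (sep l cur : List Char) (acc : List (List Char)) :
    PySem.Chars.splitOn.go sep 0 l cur acc = ((cur.reverse ++ l) :: acc).reverse := by
  rw [PySem.Chars.splitOn.go]

theorem go_nil (sep cur : List Char) (acc : List (List Char)) (fuel : Nat) :
    PySem.Chars.splitOn.go sep (fuel+1) [] cur acc = (cur.reverse :: acc).reverse := by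
  rw [PySem.Chars.splitOn.go]; omega

theorem go_cons (sep cur : List Char) (acc : List (List Char)) (fuel : Nat) (c : Char) (rest : List Char) :
    PySem.Chars.splitOn.go sep (fuel+1) (c :: rest) cur acc =
      if sep.isPrefixOf (c :: rest) then
        PySem.Chars.splitOn.go sep fuel (List.drop sep.length (c :: rest)) [] (cur.reverse :: acc)
      else PySem.Chars.splitOn.go sep fuel rest (c :: cur) acc := by
  rw [PySem.Chars.splitOn.go]

theorem goM_zero (sep l cur : List Char) (acc : List (List Char)) (m : Nat) :
    PySem.Chars.splitOnMax.go sep 0 m l cur acc = ((cur.reverse ++ l) :: acc).reverse := by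
  rw [PySem.Chars.splitOnMax.go]

theorem goM_nil (sep cur : List Char) (acc : List (List Char)) (fuel m : Nat) :
    PySem.Chars.splitOnMax.go sep (fuel+1) m [] cur acc = (cur.reverse :: acc).reverse := by
  rw [PySem.Chars.splitOnMax.go]; omega

theorem goM_cons (sep cur : List Char) (acc : List (List Char)) (fuel m : Nat) (c : Char) (rest : List Char) :
    PySem.Chars.splitOnMax.go sep (fuel+1) m (c :: rest) cur acc =
      if m = 0 then ((cur.reverse ++ (c :: rest)) :: acc).reverse
      else if sep.isPrefixOf (c :: rest) then
        PySem.Chars.splitOnMax.go sep fuel (m-1) (List.drop sep.length (c :: rest)) [] (cur.reverse :: acc)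
      else PySem.Chars.splitOnMax.go sep fuel m rest (c :: cur) acc := by
  rw [PySem.Chars.splitOnMax.go]

-- the cur/acc accumulators only decorate the result
theorem go_cur (sep : List Char) : ∀ (fuel : Nat) (l cur : List Char) (acc : List (List Char)),
    PySem.Chars.splitOn.go sep fuel l cur acc =
      acc.reverse ++ (match PySem.Chars.splitOn.go sep fuel l [] [] with
        | [] => []
        | h :: t => (cur.reverse ++ h) :: t) := by
  intro fuel
  induction fuel with
  | zero => intro l cur acc; rw [go_zero, go_zero]; simp
  | succ n ih =>
    intro l cur acc
    cases l with
    | nil => rw [go_nil, go_nil]; simp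
    | cons c rest =>
      rw [go_cons, go_cons]
      by_cases hp : sep.isPrefixOf (c :: rest)
      · simp only [hp, if_true, List.reverse_nil]
        rw [ih _ [] (cur.reverse :: acc), ih _ [] [([] : List Char)]]
        cases h : PySem.Chars.splitOn.go sep n (List.drop sep.length (c :: rest)) [] [] <;> simp
      · simp only [hp, Bool.false_eq_true, if_false]
        rw [ih rest (c :: cur) acc, ih rest [c] []]
        cases h : PySem.Chars.splitOn.go sep n rest [] [] <;> simp

theorem goM_cur (sep : List Char) : ∀ (fuel : Nat) (m : Nat) (l cur : List Char) (acc : List (List Char)),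
    PySem.Chars.splitOnMax.go sep fuel m l cur acc =
      acc.reverse ++ (match PySem.Chars.splitOnMax.go sep fuel m l [] [] with
        | [] => []
        | h :: t => (cur.reverse ++ h) :: t) := by
  intro fuel
  induction fuel with
  | zero => intro m l cur acc; rw [goM_zero, goM_zero]; simp
  | succ n ih =>
    intro m l cur acc
    cases l with
    | nil => rw [goM_nil, goM_nil]; simp
    | cons c rest =>
      rw [goM_cons, goM_cons]
      by_cases hm : m = 0
      · simp [hm]
      · simp only [hm, if_false]
        by_cases hp : sep.isPrefixOf (c :: rest)
        · simp only [hp, if_true, List.reverse_nil]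
          rw [ih _ _ [] (cur.reverse :: acc), ih _ _ [] [([] : List Char)]]
          cases h : PySem.Chars.splitOnMax.go sep n (m-1) (List.drop sep.length (c :: rest)) [] [] <;> simp
        · simp only [hp, Bool.false_eq_true, if_false]
          rw [ih m rest (c :: cur) acc, ih m rest [c] []]
          cases h : PySem.Chars.splitOnMax.go sep n m rest [] [] <;> simp

theorem goM_mzero (sep : List Char) (fuel : Nat) (l cur : List Char) (acc : List (List Char)) :
    PySem.Chars.splitOnMax.go sep fuel 0 l cur acc = ((cur.reverse ++ l) :: acc).reverse := by
  cases fuel with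
  | zero => rw [goM_zero]
  | succ n =>
    cases l with
    | nil => rw [goM_nil]; simp
    | cons c r => rw [goM_cons]; simp

theorem split_main (sep : List Char) (hsep : sep ≠ []) :
    ∀ (fuel : Nat) (l : List Char), l.length < fuel →
    ∃ h t, PySem.Chars.splitOn.go sep fuel l [] [] = h :: t
      ∧ PySem.Chars.splitOnMax.go sep fuel 1 l [] [] =
          (match t with | [] => [h] | _ :: _ => [h, PySem.Chars.join sep t])
      ∧ h <+: l ∧ ¬ sep <:+: h ∧ (∀ p ∈ t, ¬ sep <:+: p)
      ∧ PySem.Chars.join sep (h :: t) = l := by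
  intro fuel
  induction fuel with
  | zero => intro l hl; omega
  | succ n ih =>
    intro l hl
    cases l with
    | nil =>
      refine ⟨[], [], ?_, ?_, ?_, ?_, ?_, ?_⟩
      · rw [go_nil]; simp
      · rw [goM_nil]; simp
      · simp
      · simpa [List.infix_nil] using hsep
      · simp
      · rw [PySem.Chars.join_singleton]
    | cons c rest =>
      by_cases hp : sep.isPrefixOf (c :: rest)
      · have hpre : sep <+: (c :: rest) := List.isPrefixOf_iff_prefix.mp hp
        have hdl : (List.drop sep.length (c :: rest)).length < n := by
          have h1 : 1 ≤ sep.length := List.length_pos_iff.mpr hsep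
          simp only [List.length_drop, List.length_cons] at hl ⊢
          omega
        obtain ⟨h', t', hgo, hgoM, hpref, hpure, hpuret, hjoin⟩ := ih _ hdl
        refine ⟨[], h' :: t', ?_, ?_, ?_, ?_, ?_, ?_⟩
        · rw [go_cons]; simp only [hp, if_true, List.reverse_nil]
          rw [go_cur sep n _ [] [[]], hgo]; simp
        · rw [goM_cons, if_neg (by omega : ¬(1:Nat) = 0)]
          simp only [hp, if_true, List.reverse_nil, Nat.sub_self]
          rw [goM_mzero]; simp [hjoin]
        · simp
        · simpa [List.infix_nil] using hsep
        · intro p hpmem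
          rcases List.mem_cons.mp hpmem with h1 | h1
          · exact h1 ▸ hpure
          · exact hpuret p h1
        · rcases hpre with ⟨suf, hsuf⟩
          have : List.drop sep.length (c :: rest) = suf := by
            rw [← hsuf]; simp
          rw [PySem.Chars.join_cons_cons]
          simp [hjoin, ← hsuf]
      · have hrl : rest.length < n := by simp at hl; omega
        obtain ⟨h', t', hgo, hgoM, hpref, hpure, hpuret, hjoin⟩ := ih rest hrl
        refine ⟨c :: h', t', ?_, ?_, ?_, ?_, ?_, ?_⟩
        · rw [go_cons]; simp only [hp, Bool.false_eq_true, if_false]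
          rw [go_cur sep n rest [c] [], hgo]; simp
        · rw [goM_cons, if_neg (by omega : ¬(1:Nat) = 0)]
          simp only [hp, Bool.false_eq_true, if_false]
          rw [goM_cur sep n 1 rest [c] [], hgoM]
          cases t' <;> simp
        · exact List.cons_prefix_cons.mpr ⟨rfl, hpref⟩
        · -- sep not infix of c :: h'
          intro hinf
          rcases hinf with ⟨s1, s2, hdecomp⟩
          cases s1 with
          | nil =>
            -- sep is a prefix of c :: h', which is a prefix of c :: rest
            apply hp
            apply List.isPrefixOf_iff_prefix.mpr
            have h1 : sep <+: (c :: h') := ⟨s2, by simpa using hdecomp⟩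
            exact h1.trans (List.cons_prefix_cons.mpr ⟨rfl, hpref⟩)
          | cons a as =>
            -- sep infix of h'
            apply hpure
            have : as ++ sep ++ s2 = h' := by
              have := hdecomp
              simp only [List.cons_append, List.append_assoc] at this ⊢
              cases this; simp
            exact ⟨as, s2, this⟩
        · exact hpuret
        · cases t' with
          | nil => simp_all [PySem.Chars.join_singleton]
          | cons q qs =>
            rw [PySem.Chars.join_cons_cons] at hjoin ⊢
            simp [← hjoin]

-- A's re-join loop, in closed form
theorem loop_eq (x d : String) : ∀ (ts : List String),
    ((PySem.List.pyRange 0 (((x :: ts).length : Nat) : Int)).foldl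
       (fun acc j => if j == 0 then acc
         else acc ++ PySem.List.pyGetD (x :: ts) j "" ++ d) "").toList
     = (ts.map (fun p => p.toList ++ d.toList)).flatten := by
  intro ts
  induction ts using List.reverseRecOn with
  | nil =>
    have h1 : (((x :: ([] : List String)).length : Nat) : Int) = 0 + 1 := by simp
    rw [h1, PySem.List.pyRange_one_singleton]
    simp
  | append_singleton ts y ih =>
    have hlen : (((x :: (ts ++ [y])).length : Nat) : Int) = (((x :: ts).length : Nat) : Int) + 1 := by
      simp
    rw [hlen, PySem.List.pyRange_one_succ_right (by positivity), List.foldl_append]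
    have hcong : (PySem.List.pyRange 0 (((x :: ts).length : Nat) : Int)).foldl
        (fun acc j => if j == 0 then acc
          else acc ++ PySem.List.pyGetD (x :: (ts ++ [y])) j "" ++ d) "" =
        (PySem.List.pyRange 0 (((x :: ts).length : Nat) : Int)).foldl
        (fun acc j => if j == 0 then acc
          else acc ++ PySem.List.pyGetD (x :: ts) j "" ++ d) "" := by
      apply PySem.List.foldl_congr_mem
      intro b j hj
      have hjr := (PySem.List.mem_pyRange_one).mp hj
      obtain ⟨k, rfl⟩ := Int.eq_ofNat_of_zero_le hjr.1
      have hk : k < (x :: ts).length := by exact_mod_cast hjr.2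
      rw [PySem.List.pyGetD_natCast, PySem.List.pyGetD_natCast,
          show (x :: (ts ++ [y])) = (x :: ts) ++ [y] by simp,
          List.getD_eq_getElem?_getD, List.getD_eq_getElem?_getD,
          List.getElem?_append_left hk]
    rw [hcong, List.foldl_cons, List.foldl_nil]
    have hne : ((((x :: ts).length : Nat) : Int) == 0) = false := by simp; omega
    rw [hne]
    have hget : PySem.List.pyGetD (x :: (ts ++ [y])) (((x :: ts).length : Nat) : Int) "" = y := by
      rw [PySem.List.pyGetD_natCast, show (x :: (ts ++ [y])) = (x :: ts) ++ [y] by simp,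
          List.getD_eq_getElem?_getD, List.getElem?_append_right (le_refl _)]
      simp
    rw [hget]
    simp only [Bool.false_eq_true, if_false, String.toList_append, List.map_append, List.flatten_append]
    rw [ih]
    simp
-- flatten of (piece ++ sep) pieces is join with a trailing sep
theorem flatten_eq_join (sep : List Char) : ∀ (t : List (List Char)), t ≠ [] →
    (t.map (fun cs => cs ++ sep)).flatten = PySem.Chars.join sep t ++ sep := by
  intro t
  induction t with
  | nil => intro h; exact absurd rfl h
  | cons a r ih =>
    intro _
    cases r with
    | nil => simp [PySem.Chars.join_singleton]
    | cons b rs =>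
      rw [List.map_cons, List.flatten_cons, ih (by simp), PySem.Chars.join_cons_cons]
      simp


theorem pyGetD_one (a b : String) (r : List String) : PySem.List.pyGetD (a :: b :: r) 1 "" = b := by
  rw [show (1:Int) = ((1:Nat):Int) by simp, PySem.List.pyGetD_natCast]
  simp

-- ===== VERDICT (by name: the statement is the Claim_ definition above) =====
theorem caution_split_spec : Claim_equal_caution_split := by
  intro text delimiter _ hpre
  unfold Spec_caution_split
  have hsep : delimiter.toList ≠ [] := by
    intro h
    exact hpre (by simpa using congrArg String.ofList h)
  have hse : delimiter.toList.isEmpty = false := by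
    simpa [List.isEmpty_iff] using hsep
  obtain ⟨h, t, hgo', hgoM', hpref, hpureh, hpuret, hjoin⟩ :=
    split_main delimiter.toList hsep (text.toList.length + 1) text.toList (by omega)
  have hgo := hgo'
  have hgoM := hgoM'
  simp only [String.length_toList] at hgo hgoM
  have hA : PySem.Str.split? text delimiter =
      some ((h :: t).map String.ofList) := by
    simp [PySem.Str.split?, PySem.Chars.split?, hse, PySem.Chars.splitOn, hgo]
  have hB : PySem.Str.splitMax? text delimiter 1 =
      some ((match t with
             | [] => [h]
             | _ :: _ => [h, PySem.Chars.join delimiter.toList t]).map String.ofList) := by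
    simp [PySem.Str.splitMax?, PySem.Chars.splitMax?, hse, PySem.Chars.splitOnMax, hgoM,
          show ¬((1:Int) < 0) by omega]
  simp only [caution_split, caution_split_alt, hA, hB]
  cases t with
  | nil => simp
  | cons y ys =>
    cases ys with
    | nil =>
      -- exactly one delimiter: both return the two pieces unchanged
      have hnotin : PySem.Chars.isIn delimiter.toList y = false := by
        rw [Bool.eq_false_iff]
        intro hin
        exact hpuret y (by simp) ((PySem.Chars.isIn_iff_infix _ _).mp hin)
      simp [PySem.Chars.join_singleton, pyGetD_one, hnotin, PySem.Str.isIn]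
    | cons y2 ys2 =>
      -- two or more delimiters: A re-joins the tail, B re-appends the delimiter
      have hinS : PySem.Str.isIn delimiter
          (String.ofList (PySem.Chars.join delimiter.toList (y :: y2 :: ys2))) = true := by
        rw [PySem.Str.isIn_iff_infix]
        refine ⟨y, PySem.Chars.join delimiter.toList (y2 :: ys2), ?_⟩
        simp [PySem.Chars.join_cons_cons]
      simp only [List.map_cons, List.map_nil, pyGetD_one, PySem.List.pyGetD_zero_cons,
                 List.length_cons, List.length_nil, hinS, Bool.and_true]
      rw [if_pos (by omega), if_pos (by simp)]
      refine List.cons_eq_cons.mpr ⟨rfl, List.cons_eq_cons.mpr ⟨?_, rfl⟩⟩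
      apply String.toList_inj.mp
      have hloop := loop_eq (String.ofList h) delimiter ((y :: y2 :: ys2).map String.ofList)
      have hfl : (((y :: y2 :: ys2).map String.ofList).map (fun p => p.toList ++ delimiter.toList)).flatten
          = PySem.Chars.join delimiter.toList (y :: y2 :: ys2) ++ delimiter.toList := by
        rw [List.map_map]
        rw [show ((fun p => p.toList ++ delimiter.toList) ∘ String.ofList)
              = (fun cs => cs ++ delimiter.toList) by funext l; simp]
        exact flatten_eq_join delimiter.toList _ (by simp)
      simp only [List.map_cons, List.length_cons, List.length_map] at hloop ⊢
      rw [hloop]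
      simpa using hfl
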